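-- pv_equiv track=rewrite | github.com/emaanfatima312005-wq/Portfolio | Creating a Hybrid Encryption Algorithm.py | keyless_transposition_encrypt
-- ===== SOURCE A (Python) =====
-- def keyless_transposition_encrypt(plaintext):
--     text = plaintext.replace(" ", "")
--     result = ""
--     for i in range(0, len(text) - 1, 2):
--         result += text[i + 1] + text[i]
--     if len(text) % 2 != 0:
--         result += text[-1]
--     return result
-- ===== SOURCE B (Python) =====
-- def keyless_transposition_encrypt(plaintext):
--     text = plaintext.replace(" ", "")
--     evens, odds = text[0::2], text[1::2]
--     result = "".join(o + e for e, o in zip(evens, odds))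
--     if len(odds) < len(evens):
--         result += evens[-1]
--     return result
-- ===== Notes on version B (the rewrite author's own statement) =====
-- stated objective: alternative
-- what changed: Replaces the explicit i/i+1 index loop with two strided slices (evens/odds) zipped and joined odd-then-even, appending the unpaired last even character when the stripped text has odd length.
import Mathlib
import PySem

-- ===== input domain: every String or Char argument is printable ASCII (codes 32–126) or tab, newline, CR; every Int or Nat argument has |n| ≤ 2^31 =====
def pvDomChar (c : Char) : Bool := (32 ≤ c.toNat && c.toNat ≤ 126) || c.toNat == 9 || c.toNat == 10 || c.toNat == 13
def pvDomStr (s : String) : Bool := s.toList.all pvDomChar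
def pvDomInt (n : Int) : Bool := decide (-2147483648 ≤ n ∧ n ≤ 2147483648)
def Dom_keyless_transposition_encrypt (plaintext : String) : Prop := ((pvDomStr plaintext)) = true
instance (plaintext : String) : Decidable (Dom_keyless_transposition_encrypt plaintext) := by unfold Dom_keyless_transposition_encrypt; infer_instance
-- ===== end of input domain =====

-- B swaps adjacent pairs via two strided slices (evens/odds) zipped odd-then-even instead of A's i/i+1 index loop; objective: an alternative decomposition with the same result.

-- ===== PORT A =====
-- literal port of A: text = plaintext.replace(" ", ""); loop over range(0, len(text)-1, 2)
-- appending text[i+1] + text[i]; then text[-1] if odd length.  Indices i, i+1 are always in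
-- range and text is nonempty when text[-1] is read, so pyGetD with a dummy default is exact.
def keyless_transposition_encrypt (plaintext : String) : String :=
  let text := PySem.Chars.replace plaintext.toList [' '] []
  let result := (PySem.List.pyRange 0 ((text.length : Int) - 1) 2).foldl
    (fun r i => r ++ [PySem.List.pyGetD text (i + 1) ' ', PySem.List.pyGetD text i ' ']) []
  let result := if PySem.Int.mod (text.length : Int) 2 ≠ 0
    then result ++ [PySem.List.pyGetD text (-1) ' ']
    else result
  String.mk result

-- ===== PORT B =====
-- literal port of Source B: evens = text[0::2], odds = text[1::2]; "".join(o + e for e, o in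
-- zip(evens, odds)); append evens[-1] when odds is shorter.  slice? with step 2 is never
-- none (step ≠ 0), and evens is nonempty where evens[-1] is read, so getD/pyGetD are exact.
def keyless_transposition_encrypt_alt (plaintext : String) : String :=
  let text := PySem.Chars.replace plaintext.toList [' '] []
  let evens := (PySem.List.slice? text (some 0) none 2).getD []
  let odds := (PySem.List.slice? text (some 1) none 2).getD []
  let result := PySem.Chars.join [] ((evens.zip odds).map (fun p => [p.2] ++ [p.1]))
  let result := if odds.length < evens.length
    then result ++ [PySem.List.pyGetD evens (-1) ' ']
    else result
  String.mk result

-- ===== PRECONDITION & SPEC =====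
def Spec_keyless_transposition_encrypt (plaintext : String) (out : String) : Prop := out = keyless_transposition_encrypt_alt plaintext
instance (plaintext : String) (out : String) : Decidable (Spec_keyless_transposition_encrypt plaintext out) := by unfold Spec_keyless_transposition_encrypt; infer_instance

-- ===== CLAIM (what is proved, stated in full; the proofs are below) =====
def Claim_equal_keyless_transposition_encrypt : Prop := ∀ (plaintext : String), Dom_keyless_transposition_encrypt plaintext → Spec_keyless_transposition_encrypt plaintext (keyless_transposition_encrypt plaintext)

-- ===== LEMMAS AND PROOFS =====

-- the common indexed form both ports reduce to:
-- the swapped pairs at indices (2k+1, 2k), then the unpaired last character if the length is odd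
def pvCore (cs : List Char) : List Char :=
  ((List.range (cs.length / 2)).flatMap fun k => [cs.getD (2 * k + 1) ' ', cs.getD (2 * k) ' '])
    ++ (if cs.length % 2 = 1 then [cs.getD (cs.length - 1) ' '] else [])

lemma pv_join_nil_eq_flatten : ∀ parts : List (List Char), PySem.Chars.join [] parts = parts.flatten
  | [] => PySem.Chars.join_nil []
  | [p] => by simp [PySem.Chars.join_singleton]
  | p :: q :: r => by
      rw [PySem.Chars.join_cons_cons, pv_join_nil_eq_flatten (q :: r)]; simp

lemma pv_filterMap_eq_map {α β : Type} (f : α → Option β) (g : α → β) :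
    ∀ l : List α, (∀ x ∈ l, f x = some (g x)) → l.filterMap f = l.map g
  | [], _ => rfl
  | x :: t, h => by
      simp [h x (by simp), pv_filterMap_eq_map f g t (fun y hy => h y (by simp [hy]))]

lemma pv_zip_range (e o : Nat) (h : o ≤ e) :
    (List.range e).zip (List.range o) = (List.range o).map (fun k => (k, k)) := by
  apply List.ext_getElem
  · simp [Nat.min_eq_right h]
  · intro i h1 h2
    simp [List.getElem_zip]

-- A's loop reduces to pvCore
lemma pv_aCore (cs : List Char) :
    (PySem.List.pyRange 0 ((cs.length : Int) - 1) 2).foldl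
      (fun r i => r ++ [PySem.List.pyGetD cs (i + 1) ' ', PySem.List.pyGetD cs i ' ']) []
      ++ (if PySem.Int.mod (cs.length : Int) 2 ≠ 0
          then [PySem.List.pyGetD cs (-1) ' '] else []) = pvCore cs := by
  unfold pvCore
  rw [PySem.List.pyRange_of_pos 0 ((cs.length : Int) - 1) (by norm_num),
    PySem.List.foldl_append_eq_flatMap, List.flatMap_map,
    show (if (0:Int) < (cs.length : Int) - 1 then (((cs.length : Int) - 1 - 0 + 2 - 1) / 2).toNat else 0)
      = cs.length / 2 from by split <;> omega, List.nil_append]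
  congr 1
  · apply List.flatMap_congr
    intro a _
    rw [show (0 + 2 * (a:Int) + 1) = ((2 * a + 1 : Nat) : Int) from by push_cast; ring,
      show (0 + 2 * (a:Int)) = ((2 * a : Nat) : Int) from by push_cast; ring,
      PySem.List.pyGetD_natCast, PySem.List.pyGetD_natCast]
  · by_cases h : cs.length % 2 = 1
    · have hne : cs ≠ [] := by intro he; simp [he] at h
      rw [if_pos (show PySem.Int.mod (cs.length : Int) 2 ≠ 0 from by simp [pysem]; omega),
        if_pos h, PySem.List.pyGetD_neg_one cs ' ' hne,
        List.getLast_eq_getElem, List.getD_eq_getElem]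
    · rw [if_neg (show ¬ PySem.Int.mod (cs.length : Int) 2 ≠ 0 from by simp [pysem]; omega),
        if_neg h]

-- text[0::2] is the characters at even indices
lemma pv_evens (cs : List Char) :
    (PySem.List.slice? cs (some 0) none 2).getD [] =
    (List.range ((cs.length + 1) / 2)).map (fun k => cs.getD (2 * k) ' ') := by
  simp only [PySem.List.slice?, PySem.List.sliceIndices]
  norm_num
  rw [show (if 0 < cs.length then (((cs.length:Int) + 2 - 1) / 2).toNat else 0)
      = (cs.length + 1) / 2 from by split <;> omega]
  apply pv_filterMap_eq_map
  intro k hk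
  rw [List.mem_range] at hk
  have h2 : 2 * k < cs.length := by omega
  rw [show (2 * (k:Int)).toNat = 2 * k from by omega]
  simp [List.getElem?_eq_getElem h2]

-- text[1::2] is the characters at odd indices
lemma pv_odds (cs : List Char) :
    (PySem.List.slice? cs (some 1) none 2).getD [] =
    (List.range (cs.length / 2)).map (fun k => cs.getD (2 * k + 1) ' ') := by
  simp only [PySem.List.slice?, PySem.List.sliceIndices]
  norm_num
  by_cases hn : cs.length = 0
  · simp [hn]
  · rw [show min 1 ((cs.length : Int)) = 1 from by omega,
      show (if 1 < cs.length then (((cs.length:Int) - 1 + 2 - 1) / 2).toNat else 0)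
        = cs.length / 2 from by split <;> omega]
    apply pv_filterMap_eq_map
    intro k hk
    rw [List.mem_range] at hk
    have h2 : 2 * k + 1 < cs.length := by omega
    rw [show (1 + 2 * (k:Int)).toNat = 2 * k + 1 from by omega]
    simp [List.getElem?_eq_getElem h2]

lemma pv_last_map_range (f : Nat → Char) (e : Nat) (he : 0 < e) :
    PySem.List.pyGetD ((List.range e).map f) (-1) ' ' = f (e - 1) := by
  rw [PySem.List.pyGetD_neg_one _ ' ' (by simp; omega), List.getLast_eq_getElem]
  simp

-- B's zip-and-join reduces to pvCore
lemma pv_bCore (cs : List Char) :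
    (PySem.Chars.join [] ((((PySem.List.slice? cs (some 0) none 2).getD []).zip
        ((PySem.List.slice? cs (some 1) none 2).getD [])).map (fun p => [p.2] ++ [p.1])))
      ++ (if ((PySem.List.slice? cs (some 1) none 2).getD []).length
            < ((PySem.List.slice? cs (some 0) none 2).getD []).length
          then [PySem.List.pyGetD ((PySem.List.slice? cs (some 0) none 2).getD []) (-1) ' ']
          else []) = pvCore cs := by
  unfold pvCore
  rw [pv_evens, pv_odds, List.zip_map,
    pv_zip_range ((cs.length + 1) / 2) (cs.length / 2) (by omega), pv_join_nil_eq_flatten]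
  congr 1
  · rw [List.flatMap_def]
    simp only [List.map_map]
    rfl
  · by_cases h : cs.length % 2 = 1
    · rw [if_pos (by simp; omega), if_pos h,
        pv_last_map_range _ ((cs.length + 1) / 2) (by omega)]
      congr 2
      omega
    · rw [if_neg (by simp; omega), if_neg h]

-- ===== VERDICT (by name: the statement is the Claim_ definition above) =====
theorem keyless_transposition_encrypt_spec : Claim_equal_keyless_transposition_encrypt := by
  intro p _
  unfold Spec_keyless_transposition_encrypt keyless_transposition_encrypt keyless_transposition_encrypt_alt
  set cs := PySem.Chars.replace p.toList [' '] [] with hcs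
  apply congrArg String.mk
  rw [show ∀ (r : List Char) (c : Prop) [Decidable c] (x : List Char),
        (if c then r ++ x else r) = r ++ (if c then x else []) from
      fun r c _ x => by split <;> simp]
  rw [show ∀ (r : List Char) (c : Prop) [Decidable c] (x : List Char),
        (if c then r ++ x else r) = r ++ (if c then x else []) from
      fun r c _ x => by split <;> simp]
  rw [pv_aCore cs, pv_bCore cs]
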